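-- pv_equiv track=rewrite | github.com/anna-a-m/2019-2-level-labs | lab_4/main.py | clean_tokenize_corpus
-- ===== SOURCE A (Python) =====
-- def clean_tokenize_corpus(scripts: list) -> list:
--     if not isinstance(scripts, list):
--         return []
--     corpora = []
--     for script in scripts:
--         if not isinstance(script, str):
--             continue
--         script = script.lower()
--         script = script.replace('<br />', ' ')
--         for sign in script:
--             if not sign.isalpha() and sign != ' ':
--                 script = script.replace(sign, '')
--         corpora.append(script.split())
--     return corpora
-- ===== SOURCE B (Python) =====
-- def clean_tokenize_corpus(scripts: list) -> list:
--     if not isinstance(scripts, list):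
--         return []
--     corpora = []
--     for script in scripts:
--         if not isinstance(script, str):
--             continue
--         text = script.lower().replace('<br />', ' ')
--         tokens = []
--         buf = []
--         for ch in text:
--             if ch.isalpha():
--                 buf.append(ch)
--             elif ch == ' ':
--                 if buf:
--                     tokens.append(''.join(buf))
--                 buf = []
--             # any other character is dropped in place (A deletes it), so it
--             # joins its neighbours rather than separating them
--         if buf:
--             tokens.append(''.join(buf))
--         corpora.append(tokens)
--     return corpora
-- ===== Notes on version B (the rewrite author's own statement) =====
-- stated objective: alternative
-- what changed: A removes each non-alpha non-space character by rebuilding the whole string with str.replace and then splits; B makes a single pass over the characters with a token buffer (append alpha chars, flush on space, drop anything else), never rebuilding the string.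
import Mathlib
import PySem

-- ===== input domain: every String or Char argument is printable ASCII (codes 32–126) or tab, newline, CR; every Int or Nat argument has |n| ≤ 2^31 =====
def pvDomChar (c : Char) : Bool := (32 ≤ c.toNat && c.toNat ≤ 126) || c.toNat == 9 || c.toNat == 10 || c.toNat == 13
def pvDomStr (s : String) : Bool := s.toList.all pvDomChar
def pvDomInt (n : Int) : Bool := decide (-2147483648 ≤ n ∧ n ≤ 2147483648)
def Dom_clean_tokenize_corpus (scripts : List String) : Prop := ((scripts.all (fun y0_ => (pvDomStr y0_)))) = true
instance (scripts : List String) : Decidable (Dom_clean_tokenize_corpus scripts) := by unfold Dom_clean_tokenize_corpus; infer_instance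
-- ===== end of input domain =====

-- B replaces A's clean-then-split (one full string rebuild per non-alpha character, then split)
-- by a single pass over the characters with a token buffer; objective: alternative decomposition.

-- ===== PORT A =====
def clean_tokenize_corpus (scripts : List String) : List (List String) :=
  scripts.foldl (fun corpora script =>
    let s1 := PySem.Str.lower script
    let s2 := PySem.Str.replace s1 "<br />" " "
    -- 'for sign in script: if …: script = script.replace(sign, "")' — iterate the
    -- string as it was at loop entry, rebuilding the accumulator string each time
    let s3 := s2.toList.foldl (fun s sign =>
        if !PySem.Chars.isalpha sign && sign != ' ' then
          PySem.Str.replace s (String.ofList [sign]) ""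
        else s) s2
    corpora ++ [PySem.Str.split₀ s3]) []

-- ===== PORT B =====
-- one step of Source B's buffer tokenizer: alpha → extend buffer, ' ' → flush buffer, else skip
def pvStep (st : List String × List Char) (ch : Char) : List String × List Char :=
  if PySem.Chars.isalpha ch then (st.1, st.2 ++ [ch])
  else if ch = ' ' then
    (if st.2.isEmpty then st.1 else st.1 ++ [String.ofList st.2], [])
  else st

def clean_tokenize_corpus_alt (scripts : List String) : List (List String) :=
  scripts.foldl (fun corpora script =>
    let text := PySem.Str.replace (PySem.Str.lower script) "<br />" " "
    let st := text.toList.foldl pvStep ([], [])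
    let tokens := if st.2.isEmpty then st.1 else st.1 ++ [String.ofList st.2]
    corpora ++ [tokens]) []

-- ===== PRECONDITION & SPEC =====
def Spec_clean_tokenize_corpus (scripts : List String) (out : List (List String)) : Prop := out = clean_tokenize_corpus_alt scripts
instance (scripts : List String) (out : List (List String)) : Decidable (Spec_clean_tokenize_corpus scripts out) := by unfold Spec_clean_tokenize_corpus; infer_instance

-- ===== CLAIM (what is proved, stated in full; the proofs are below) =====
def Claim_equal_clean_tokenize_corpus : Prop := ∀ (scripts : List String), Dom_clean_tokenize_corpus scripts → Spec_clean_tokenize_corpus scripts (clean_tokenize_corpus scripts)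

-- ===== LEMMAS AND PROOFS =====

-- a character is kept by A's removal loop iff it is alphabetic or a space
def pvGood (c : Char) : Bool := PySem.Chars.isalpha c || c == ' '

-- replacing a single character by "" is filtering it out
lemma replace_go_single (c : Char) : ∀ (fuel : Nat) (l acc : List Char), l.length ≤ fuel →
    PySem.Chars.replace.go [c] [] fuel l acc = acc.reverse ++ l.filter (fun x => x != c) := by
  intro fuel
  induction fuel with
  | zero =>
    intro l acc h
    have hl : l = [] := List.eq_nil_of_length_eq_zero (Nat.le_zero.mp h)
    subst hl; simp [PySem.Chars.replace.go]
  | succ n ih =>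
    intro l acc h
    cases l with
    | nil => simp [PySem.Chars.replace.go]
    | cons c' t =>
      simp only [PySem.Chars.replace.go, List.isPrefixOf, List.filter]
      by_cases hc : c = c'
      · subst hc; simp [ih t _ (by simpa using Nat.le_of_succ_le_succ h)]
      · have hne : (c' != c) = true := by simp [bne_iff_ne]; exact Ne.symm hc
        simp [beq_iff_eq, hc, hne, ih t _ (by simpa using Nat.le_of_succ_le_succ h)]

lemma replace_single (c : Char) (cs : List Char) :
    PySem.Chars.replace cs [c] [] = cs.filter (fun x => x != c) := by
  simpa [PySem.Chars.replace] using replace_go_single c cs.length cs [] le_rfl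

-- A's inner loop, moved to the List Char side
lemma inner_fold_toList (p : List Char) : ∀ (s : String),
    (p.foldl (fun s sign =>
        if !PySem.Chars.isalpha sign && sign != ' ' then
          PySem.Str.replace s (String.ofList [sign]) ""
        else s) s).toList
    = p.foldl (fun l sign =>
        if !PySem.Chars.isalpha sign && sign != ' ' then l.filter (fun x => x != sign) else l)
        s.toList := by
  induction p with
  | nil => intro s; rfl
  | cons sign p ih =>
    intro s
    simp only [List.foldl_cons]
    by_cases hb : (!PySem.Chars.isalpha sign && sign != ' ') = true
    · rw [hb, if_pos rfl, if_pos rfl, ih]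
      congr 1
      simp [PySem.Str.replace, replace_single]
    · rw [Bool.not_eq_true] at hb
      rw [hb]
      simp only [Bool.false_eq_true, if_false]
      exact ih s

-- folding the per-character filters equals one filter with a conjunction
lemma remAll_filter (p : List Char) : ∀ (l : List Char) (f : Char → Bool),
    p.foldl (fun l sign =>
        if !PySem.Chars.isalpha sign && sign != ' ' then l.filter (fun x => x != sign) else l)
      (l.filter f)
    = l.filter (fun c => f c && p.all (fun sign => pvGood sign || c != sign)) := by
  induction p with
  | nil => intro l f; simp
  | cons sign p ih =>
    intro l f
    simp only [List.foldl_cons]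
    by_cases hb : (!PySem.Chars.isalpha sign && sign != ' ') = true
    · rw [if_pos hb, List.filter_filter, ih]
      apply List.filter_congr
      intro c _
      have hg : pvGood sign = false := by
        simp only [pvGood]
        simp only [Bool.and_eq_true, Bool.not_eq_true', bne_iff_ne, ne_eq] at hb
        simp [hb.1, hb.2]
      simp only [List.all_cons, hg, Bool.false_or]
      cases (c != sign) <;> cases f c <;> simp
    · rw [Bool.not_eq_true] at hb
      rw [hb, if_neg (by simp), ih]
      apply List.filter_congr
      intro c _
      have hg : pvGood sign = true := by
        simp only [pvGood]
        simp only [Bool.and_eq_false_iff, Bool.not_eq_false', bne_eq_false_iff_eq] at hb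
        rcases hb with h | h
        · simp [h]
        · simp [h]
      simp [hg]

-- the removal loop over the whole string keeps exactly the good characters
lemma remove_eq_filter_good (ds : List Char) :
    ds.foldl (fun l sign =>
        if !PySem.Chars.isalpha sign && sign != ' ' then l.filter (fun x => x != sign) else l) ds
    = ds.filter pvGood := by
  have h0 : ds = ds.filter (fun _ => true) := by simp
  conv_lhs => rw [h0]
  rw [remAll_filter]
  simp only [List.filter_true, Bool.true_and]
  apply List.filter_congr
  intro c hc
  by_cases hg : pvGood c = true
  · simp only [hg]
    rw [List.all_eq_true]
    intro s _
    by_cases hgs : pvGood s = true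
    · simp [hgs]
    · have : c ≠ s := by intro h; rw [h] at hg; exact hgs hg
      simp [this]
  · rw [Bool.not_eq_true] at hg
    rw [hg, List.all_eq_false]
    exact ⟨c, hc, by simp [hg]⟩

-- B's tokenizer skips the bad characters by itself
lemma fold_step_filter (ds : List Char) : ∀ (st : List String × List Char),
    ds.foldl pvStep st = (ds.filter pvGood).foldl pvStep st := by
  induction ds with
  | nil => intro st; rfl
  | cons c ds ih =>
    intro st
    by_cases hg : pvGood c = true
    · simp only [List.filter_cons, hg, List.foldl_cons]; exact ih _
    · rw [Bool.not_eq_true] at hg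
      have hstep : pvStep st c = st := by
        simp only [pvGood, Bool.or_eq_false_iff, beq_eq_false_iff_ne, ne_eq] at hg
        simp [pvStep, hg.1, hg.2]
      simp only [List.filter_cons, hg, Bool.false_eq_true, if_false, List.foldl_cons, hstep]
      exact ih st

lemma alpha_not_space (c : Char) (h : PySem.Chars.isalpha c = true) :
    PySem.Chars.isspace c = false := by
  simp only [PySem.Chars.isalpha, PySem.Chars.isupper, PySem.Chars.islower, Bool.or_eq_true,
    Bool.and_eq_true, decide_eq_true_eq, Char.le_def, UInt32.le_iff_toNat_le] at h
  have hA : ('A'.val.toNat) = 65 := rfl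
  have hZ : ('Z'.val.toNat) = 90 := rfl
  have ha : ('a'.val.toNat) = 97 := rfl
  have hz : ('z'.val.toNat) = 122 := rfl
  rw [hA, hZ, ha, hz] at h
  simp only [PySem.Chars.isspace, Char.toNat]
  rcases h with ⟨h1, h2⟩ | ⟨h1, h2⟩ <;>
    · simp only [Bool.or_eq_false_iff, Bool.and_eq_false_iff, decide_eq_false_iff_not]
      omega

-- split() of an alpha/space-only string is exactly B's buffer tokenizer
lemma go_eq_fold (ds : List Char) (h : ∀ c ∈ ds, PySem.Chars.isalpha c = true ∨ c = ' ') :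
    ∀ (buf : List Char) (acc : List (List Char)),
    (PySem.Chars.split₀.go ds buf.reverse acc).map String.ofList
    = (let st := ds.foldl pvStep (acc.reverse.map String.ofList, buf)
       if st.2.isEmpty then st.1 else st.1 ++ [String.ofList st.2]) := by
  induction ds with
  | nil =>
    intro buf acc
    simp only [PySem.Chars.split₀.go, List.foldl_nil, List.isEmpty_reverse]
    by_cases hb : buf.isEmpty <;> simp [hb]
  | cons c rest ih =>
    intro buf acc
    have hrest : ∀ x ∈ rest, PySem.Chars.isalpha x = true ∨ x = ' ' := fun x hx => h x (List.mem_cons_of_mem _ hx)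
    rcases h c List.mem_cons_self with hc | hc
    · -- alphabetic: extend the buffer / cur
      have hs : PySem.Chars.isspace c = false := alpha_not_space c hc
      simp only [PySem.Chars.split₀.go, hs, Bool.false_eq_true, if_false, List.foldl_cons]
      have : c :: buf.reverse = (buf ++ [c]).reverse := by simp
      rw [this, ih hrest (buf ++ [c]) acc]
      simp [pvStep, hc]
    · -- space: flush
      subst hc
      have hs : PySem.Chars.isspace ' ' = true := by decide
      have ha : PySem.Chars.isalpha ' ' = false := by decide
      by_cases hb : buf.isEmpty
      · have hbuf : buf = [] := List.isEmpty_iff.mp hb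
        subst hbuf
        have hgo : PySem.Chars.split₀.go (' ' :: rest) List.nil.reverse acc
            = PySem.Chars.split₀.go rest [] acc := by
          simp [PySem.Chars.split₀.go, hs]
        rw [hgo]
        have := ih hrest [] acc
        simp only [List.reverse_nil] at this
        rw [this]
        have hstep : pvStep (acc.reverse.map String.ofList, ([] : List Char)) ' '
            = (acc.reverse.map String.ofList, []) := by simp [pvStep, ha]
        simp only [List.foldl_cons, hstep]
      · have hgo : PySem.Chars.split₀.go (' ' :: rest) buf.reverse acc
            = PySem.Chars.split₀.go rest [] (buf :: acc) := by
          have h1 : buf.reverse.isEmpty = false := by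
            simp [List.isEmpty_reverse]; exact fun h => hb (by simp [h])
          simp [PySem.Chars.split₀.go, hs, h1]
        rw [hgo]
        have := ih hrest [] (buf :: acc)
        simp only [List.reverse_nil, List.reverse_cons, List.map_append, List.map_cons,
          List.map_nil] at this
        rw [this]
        have hstep : pvStep (acc.reverse.map String.ofList, buf) ' '
            = (acc.reverse.map String.ofList ++ [String.ofList buf], []) := by
          simp [pvStep, ha, hb]
        simp only [List.foldl_cons, hstep]

-- the whole per-string pipeline of A equals the pipeline of B
lemma per_string (script : String) :
    PySem.Str.split₀
      ((PySem.Str.replace (PySem.Str.lower script) "<br />" " ").toList.foldl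
        (fun s sign =>
          if !PySem.Chars.isalpha sign && sign != ' ' then
            PySem.Str.replace s (String.ofList [sign]) ""
          else s)
        (PySem.Str.replace (PySem.Str.lower script) "<br />" " "))
    = (let st := (PySem.Str.replace (PySem.Str.lower script) "<br />" " ").toList.foldl pvStep ([], [])
       if st.2.isEmpty then st.1 else st.1 ++ [String.ofList st.2]) := by
  set ds := (PySem.Str.replace (PySem.Str.lower script) "<br />" " ").toList with hds
  rw [PySem.Str.split₀]
  rw [show ∀ s : String, PySem.Chars.split₀ s.toList = PySem.Chars.split₀.go s.toList [] [] from fun _ => rfl]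
  rw [inner_fold_toList, ← hds, remove_eq_filter_good]
  have hgood : ∀ c ∈ ds.filter pvGood, PySem.Chars.isalpha c = true ∨ c = ' ' := by
    intro c hc
    have := (List.mem_filter.mp hc).2
    simp only [pvGood, Bool.or_eq_true, beq_iff_eq] at this
    exact this
  have := go_eq_fold (ds.filter pvGood) hgood [] []
  simp only [List.reverse_nil, List.map_nil] at this
  rw [show PySem.Chars.split₀.go (ds.filter pvGood) [] [] = PySem.Chars.split₀ (ds.filter pvGood) from rfl] at this
  rw [show PySem.Chars.split₀ (ds.filter pvGood) = PySem.Chars.split₀.go (ds.filter pvGood) [] [] from rfl] at this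
  rw [this, ← fold_step_filter]

-- ===== VERDICT (by name: the statement is the Claim_ definition above) =====
theorem clean_tokenize_corpus_spec : Claim_equal_clean_tokenize_corpus := by
  intro scripts _
  unfold Spec_clean_tokenize_corpus clean_tokenize_corpus clean_tokenize_corpus_alt
  rw [PySem.List.foldl_append_singleton_eq_map, PySem.List.foldl_append_singleton_eq_map]
  apply List.map_congr_left
  intro script _
  exact per_string script
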